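-- pv_equiv track=rewrite | github.com/ZigiJesse-Jackson/ASU-MCS-Projects | CSE-572/Project_2-Cluster Validation Project/main.py | find_bin
-- ===== SOURCE A (Python) =====
-- def find_bin(data_point, bins):
--     l = 0
--     r = len(bins)-1
--     mid = l + ((r-l)//2)
--     while(l<=r):
--         if(bins[mid] == data_point): return mid
--         if(bins[mid]<data_point):
--             l = mid+1
--             mid = l + ((r-l)//2)
--         else:
--             r = mid-1
--             mid = l+ ((r-l)//2)
--     return l
-- ===== SOURCE B (Python) =====
-- def find_bin(data_point, bins):
--     def go(seg, base):
--         if not seg: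
--             return base
--         m = (len(seg) - 1) // 2
--         if seg[m] == data_point:
--             return base + m
--         if seg[m] < data_point:
--             return go(seg[m + 1:], base + m + 1)
--         return go(seg[:m], base)
--     return go(bins, 0)
-- ===== Notes on version B (the rewrite author's own statement) =====
-- stated objective: alternative
-- what changed: A's iterative while-loop maintaining integer bounds l, r and a threaded mid over the whole list is replaced by a divide-and-conquer recursion that slices the list itself (go(seg, base) recurses on seg[m+1:] or seg[:m] with a base offset), computing the same comparison tree and results.
import Mathlib
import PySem

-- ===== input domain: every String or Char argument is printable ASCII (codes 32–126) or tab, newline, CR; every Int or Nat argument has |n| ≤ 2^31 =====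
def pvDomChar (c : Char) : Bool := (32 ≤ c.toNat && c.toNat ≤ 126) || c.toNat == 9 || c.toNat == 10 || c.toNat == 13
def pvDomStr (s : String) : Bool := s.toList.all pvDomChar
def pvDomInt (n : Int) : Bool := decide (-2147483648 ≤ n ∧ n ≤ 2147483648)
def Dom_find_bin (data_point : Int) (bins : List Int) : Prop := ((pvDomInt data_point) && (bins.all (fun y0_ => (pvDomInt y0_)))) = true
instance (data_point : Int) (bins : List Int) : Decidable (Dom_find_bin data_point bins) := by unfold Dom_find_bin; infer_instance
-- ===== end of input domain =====

-- B replaces A's index-interval while-loop (state l, r, mid over the whole list) by a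
-- divide-and-conquer recursion on list SLICES carrying a base offset (same results; an
-- alternative decomposition, no speed claim).


-- ===== PORT A =====
-- A's while loop as fuel recursion over the state (l, r, mid); mid is threaded through the
-- state and reassigned exactly as in the Python.  The index mid is always in range when the
-- loop body runs (0 ≤ l ≤ mid ≤ r ≤ len-1), so pyGetD's default is never taken.
-- Fuel (bins.length + 1) strictly exceeds the number of iterations, so it never runs out.
def loopA (data_point : Int) (bins : List Int) : Nat → Int → Int → Int → Int
  | 0, l, _, _ => l
  | fuel + 1, l, r, mid =>
    if l ≤ r then
      if PySem.List.pyGetD bins mid 0 = data_point then mid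
      else if PySem.List.pyGetD bins mid 0 < data_point then
        loopA data_point bins fuel (mid + 1) r ((mid + 1) + PySem.Int.floordiv (r - (mid + 1)) 2)
      else
        loopA data_point bins fuel l (mid - 1) (l + PySem.Int.floordiv ((mid - 1) - l) 2)
    else l

def find_bin (data_point : Int) (bins : List Int) : Int :=
  loopA data_point bins (bins.length + 1) 0 ((bins.length : Int) - 1)
    (0 + PySem.Int.floordiv (((bins.length : Int) - 1) - 0) 2)

-- ===== PORT B =====
-- B's recursive helper go(seg, base): divide and conquer on list slices.  seg[m] with
-- m = (len(seg)-1)//2 is always in range for nonempty seg, so pyGetD's default is never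
-- taken; seg[m+1:] and seg[:m] are the Python slices, ported with PySem.List.slice.
def goB (data_point : Int) (seg : List Int) (base : Int) : Int :=
  if h : seg = [] then base
  else
    let m : Nat := (seg.length - 1) / 2
    if PySem.List.pyGetD seg (m : Int) 0 = data_point then base + (m : Int)
    else if PySem.List.pyGetD seg (m : Int) 0 < data_point then
      goB data_point (PySem.List.slice seg (some ((m : Int) + 1)) none) (base + (m : Int) + 1)
    else
      goB data_point (PySem.List.slice seg none (some (m : Int))) base
termination_by seg.length
decreasing_by
  · have : seg.length ≠ 0 := fun hn => h (List.eq_nil_of_length_eq_zero hn)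
    rw [PySem.List.slice_from seg (by omega : (0:Int) ≤ ((seg.length - 1) / 2 : Nat) + 1)]
    simp only [List.length_drop]
    omega
  · have : seg.length ≠ 0 := fun hn => h (List.eq_nil_of_length_eq_zero hn)
    rw [PySem.List.slice_to seg (by omega : (0:Int) ≤ ((seg.length - 1) / 2 : Nat))]
    simp only [List.length_take, Int.toNat_natCast]
    omega

def find_bin_alt (data_point : Int) (bins : List Int) : Int :=
  goB data_point bins 0

-- ===== PRECONDITION & SPEC =====
def Spec_find_bin (data_point : Int) (bins : List Int) (out : Int) : Prop := out = find_bin_alt data_point bins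
instance (data_point : Int) (bins : List Int) (out : Int) : Decidable (Spec_find_bin data_point bins out) := by unfold Spec_find_bin; infer_instance

-- ===== CLAIM (what is proved, stated in full; the proofs are below) =====
def Claim_equal_find_bin : Prop := ∀ (data_point : Int) (bins : List Int), Dom_find_bin data_point bins → Spec_find_bin data_point bins (find_bin data_point bins)

-- ===== LEMMAS AND PROOFS =====

-- A's loop on the interval [l, r] computes B's recursion on the slice bins[l : r+1]
-- with base l, provided the interval lies inside the list and the fuel exceeds its size.
theorem loopA_eq_goB (data_point : Int) (bins : List Int) :
    ∀ (fuel : Nat) (l r : Int), 0 ≤ l → r < (bins.length : Int) →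
      (r + 1 - l).toNat < fuel →
      loopA data_point bins fuel l r (l + PySem.Int.floordiv (r - l) 2) =
        goB data_point ((bins.drop l.toNat).take (r + 1 - l).toNat) l := by
  intro fuel
  induction fuel with
  | zero => intro l r _ _ hf; omega
  | succ f ih =>
    intro l r hl hr _
    by_cases hlr : l ≤ r
    · -- the interval is nonempty
      set a : Nat := l.toNat with ha
      set n : Nat := (r + 1 - l).toNat with hn
      have hn1 : 1 ≤ n := by omega
      have han : a + n ≤ bins.length := by omega
      set seg : List Int := (bins.drop a).take n with hseg
      have hlen : seg.length = n := by
        simp [hseg, List.length_take, List.length_drop]; omega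
      have hne : seg ≠ [] := by
        intro hnil; rw [hnil] at hlen; simp at hlen; omega
      set m : Nat := (n - 1) / 2 with hm
      have hmn : m < n := by omega
      have hmid : l + PySem.Int.floordiv (r - l) 2 = l + (m : Int) := by
        rw [show r - l = ((n - 1 : Nat) : Int) by omega]
        rw [show ((2:Int) = ((2:Nat):Int)) by norm_num, PySem.Int.floordiv_natCast]
      have hget : PySem.List.pyGetD bins (l + (m : Int)) 0 = PySem.List.pyGetD seg (m : Int) 0 := by
        rw [show l + (m : Int) = ((a + m : Nat) : Int) by omega]
        rw [PySem.List.pyGetD_natCast, PySem.List.pyGetD_natCast]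
        unfold List.getD
        rw [hseg, List.getElem?_take_of_lt hmn, List.getElem?_drop]
      rw [hmid, loopA, if_pos hlr]
      rw [goB, dif_neg hne]
      simp only [hlen]
      rw [← hm, ← hget]
      by_cases heq : PySem.List.pyGetD bins (l + (m : Int)) 0 = data_point
      · simp [heq]
      · rw [if_neg heq, if_neg heq]
        by_cases hlt : PySem.List.pyGetD bins (l + (m : Int)) 0 < data_point
        · rw [if_pos hlt, if_pos hlt]
          rw [PySem.List.slice_from seg (by omega : (0:Int) ≤ (m : Int) + 1)]
          have hdrop : seg.drop ((m : Int) + 1).toNat =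
              (bins.drop (l + (m : Int) + 1).toNat).take (r + 1 - (l + (m : Int) + 1)).toNat := by
            rw [hseg, List.drop_take, List.drop_drop]
            congr 1
            · omega
            · congr 1; omega
          rw [hdrop, show l + (m : Int) + 1 = (l + (m:Int)) + 1 by ring]
          rw [← ih ((l + (m:Int)) + 1) r (by omega) hr (by omega)]
        · rw [if_neg hlt, if_neg hlt]
          rw [PySem.List.slice_to seg (by omega : (0:Int) ≤ (m : Int))]
          have htake : seg.take ((m : Int)).toNat =
              (bins.drop l.toNat).take ((l + (m : Int) - 1) + 1 - l).toNat := by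
            rw [hseg, List.take_take]
            congr 1
            omega
          rw [htake]
          rw [← ih l (l + (m:Int) - 1) hl (by omega) (by omega)]
    · rw [loopA, if_neg hlr]
      rw [show (r + 1 - l).toNat = 0 by omega]
      simp [goB]

-- ===== VERDICT (by name: the statement is the Claim_ definition above) =====
theorem find_bin_spec : Claim_equal_find_bin := by
  intro data_point bins _
  unfold Spec_find_bin find_bin find_bin_alt
  rw [loopA_eq_goB data_point bins (bins.length + 1) 0 ((bins.length : Int) - 1)
        le_rfl (by omega) (by omega)]
  simp
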